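-- pv_equiv track=rewrite | github.com/mikewarot/Bitgrid_python | bitgrid/cli/demo_parallel8_lut_only.py | build_parity_aligned_schedule
-- ===== SOURCE A (Python) =====
-- from typing import List, Tuple
--
-- def build_parity_aligned_schedule(orig_frames: List[List[int]], per_lane_delays: List[int]) -> Tuple[List[List[int]], List[int]]:
--     """Schedule frames so that for each frame k all lanes arrive at the same East step.
--     Choose arrivals A_k = 2*k + max_delay; inject lane r at t = A_k - delay[r].
--     Returns (schedule, arrival_indices). Adds a trailing flush step.
--     """
--     if not orig_frames:
--         return [], []
--     lanes = len(orig_frames[0])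
--     nonneg = [d for d in per_lane_delays if d is not None and d >= 0]
--     max_delay = max(nonneg) if nonneg else 0
--     n = len(orig_frames)
--     steps = 2*n + max_delay
--     schedule: List[List[int]] = [[0]*lanes for _ in range(steps)]
--     arrivals: List[int] = []
--     for k in range(n):
--         A_k = 2*k + max_delay
--         arrivals.append(A_k)
--         for r in range(lanes):
--             d = per_lane_delays[r] if r < len(per_lane_delays) and per_lane_delays[r] is not None else max_delay
--             t = A_k - int(d)
--             if 0 <= t < steps:
--                 schedule[t][r] = orig_frames[k][r]
--     schedule.append([0]*lanes)
--     return schedule, arrivals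
-- ===== SOURCE B (Python) =====
-- from typing import List, Tuple
--
-- def build_parity_aligned_schedule(orig_frames: List[List[int]], per_lane_delays: List[int]) -> Tuple[List[List[int]], List[int]]:
--     """Gather formulation: each output cell (t, r) looks up the unique frame
--     k = (t - max_delay + delay[r]) / 2 that lands there, instead of scattering
--     writes into a pre-allocated zero grid."""
--     if not orig_frames:
--         return [], []
--     lanes = len(orig_frames[0])
--     nonneg = [d for d in per_lane_delays if d is not None and d >= 0]
--     max_delay = max(nonneg) if nonneg else 0
--     n = len(orig_frames)
--     steps = 2 * n + max_delay
--     delays = [per_lane_delays[r] if r < len(per_lane_delays) and per_lane_delays[r] is not None else max_delay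
--               for r in range(lanes)]
--
--     def cell(t: int, r: int) -> int:
--         v = t - max_delay + int(delays[r])
--         if v >= 0 and v % 2 == 0 and v // 2 < n:
--             return orig_frames[v // 2][r]
--         return 0
--
--     schedule = [[cell(t, r) for r in range(lanes)] for t in range(steps)]
--     schedule.append([0] * lanes)
--     arrivals = [2 * k + max_delay for k in range(n)]
--     return schedule, arrivals
-- ===== Notes on version B (the rewrite author's own statement) =====
-- stated objective: alternative
-- what changed: B computes each output cell by gathering: it inverts the scatter, computing for every (step t, lane r) the unique frame k=(t-max_delay+delay[r])/2 (exact, even, 0<=k<n) instead of pre-allocating a zero grid and writing frames into it; arrivals come from a direct formula.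
import Mathlib
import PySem

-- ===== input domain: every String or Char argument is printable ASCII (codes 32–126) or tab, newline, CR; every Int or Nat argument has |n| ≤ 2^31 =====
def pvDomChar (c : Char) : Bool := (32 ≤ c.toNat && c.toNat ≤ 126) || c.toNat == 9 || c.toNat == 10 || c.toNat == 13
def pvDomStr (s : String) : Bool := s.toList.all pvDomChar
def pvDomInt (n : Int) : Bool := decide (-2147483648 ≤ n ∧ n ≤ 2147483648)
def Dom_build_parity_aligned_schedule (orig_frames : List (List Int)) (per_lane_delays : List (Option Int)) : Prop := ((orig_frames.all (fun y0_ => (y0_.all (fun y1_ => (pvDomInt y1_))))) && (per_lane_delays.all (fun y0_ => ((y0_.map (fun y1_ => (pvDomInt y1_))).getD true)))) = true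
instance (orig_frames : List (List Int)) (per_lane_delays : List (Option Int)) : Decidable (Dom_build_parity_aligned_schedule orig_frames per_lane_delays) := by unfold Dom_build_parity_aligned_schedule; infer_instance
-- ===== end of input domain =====

-- B rebuilds the grid as a gather (each output cell looks up the unique frame that lands
-- there) instead of A's scatter into a zero grid; equal return values, no speed claim.

-- shared helpers (both Pythons compute these the same way):
-- nonneg = [d for d in per_lane_delays if d is not None and d >= 0]
def pvNonneg (per : List (Option Int)) : List Int :=
  per.filterMap (fun o => match o with
    | some d => if 0 ≤ d then some d else none
    | none => none)

-- max_delay = max(nonneg) if nonneg else 0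
def pvMaxDelay (per : List (Option Int)) : Int :=
  (PySem.List.max? (pvNonneg per) id).getD 0

-- d = per_lane_delays[r] if r < len(per_lane_delays) and per_lane_delays[r] is not None else max_delay
def pvEffDelay (per : List (Option Int)) (M : Int) (r : Nat) : Int :=
  if r < per.length ∧ per.getD r none ≠ none then (per.getD r none).getD 0 else M

-- ===== PORT A =====
-- body of A's inner loop over r: schedule[t][r] = orig_frames[k][r] guarded by 0 <= t < steps.
-- The frame read is ported with getD defaults; Pre_ excludes the inputs where Python's
-- orig_frames[k][r] would raise IndexError (the only reads getD could default on).
def pvInnerA (orig : List (List Int)) (per : List (Option Int)) (M steps : Int) (k : Nat)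
    (sch : List (List Int)) (r : Nat) : List (List Int) :=
  -- t = A_k - int(d), with d the effective delay of lane r
  if 0 ≤ 2 * (k : Int) + M - pvEffDelay per M r ∧ 2 * (k : Int) + M - pvEffDelay per M r < steps then
    sch.set (2 * (k : Int) + M - pvEffDelay per M r).toNat
      ((sch.getD (2 * (k : Int) + M - pvEffDelay per M r).toNat []).set r ((orig.getD k []).getD r 0))
  else sch

-- body of A's outer loop over k: append A_k to arrivals, then run the inner loop over the lanes
def pvOuterA (orig : List (List Int)) (per : List (Option Int)) (M steps : Int)
    (st : List (List Int) × List Int) (k : Nat) : List (List Int) × List Int :=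
  ((List.range (orig.headD []).length).foldl (pvInnerA orig per M steps k) st.1,
   st.2 ++ [2 * (k : Int) + M])

def build_parity_aligned_schedule (orig_frames : List (List Int)) (per_lane_delays : List (Option Int)) : List (List Int) × List Int :=
  if orig_frames = [] then ([], [])
  else
    let lanes := (orig_frames.headD []).length
    let max_delay := pvMaxDelay per_lane_delays
    let n := orig_frames.length
    let steps : Int := 2 * (n : Int) + max_delay
    let res := (List.range n).foldl (pvOuterA orig_frames per_lane_delays max_delay steps)
        (List.replicate steps.toNat (List.replicate lanes 0), [])
    (res.1 ++ [List.replicate lanes 0], res.2)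

-- ===== PORT B =====
-- B's cell(t, r): k = (t - max_delay + delays[r]) // 2 must be exact and 0 <= k < n
def pvCellB (orig : List (List Int)) (M : Int) (n : Nat) (delays : List Int)
    (t : Int) (r : Nat) : Int :=
  -- v = t - max_delay + int(delays[r])
  if 0 ≤ t - M + delays.getD r 0 ∧ PySem.Int.mod (t - M + delays.getD r 0) 2 = 0 ∧
      PySem.Int.floordiv (t - M + delays.getD r 0) 2 < (n : Int) then
    (orig.getD (PySem.Int.floordiv (t - M + delays.getD r 0) 2).toNat []).getD r 0
  else 0

def build_parity_aligned_schedule_alt (orig_frames : List (List Int)) (per_lane_delays : List (Option Int)) : List (List Int) × List Int :=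
  if orig_frames = [] then ([], [])
  else
    let lanes := (orig_frames.headD []).length
    let max_delay := pvMaxDelay per_lane_delays
    let n := orig_frames.length
    let steps : Int := 2 * (n : Int) + max_delay
    let delays := (List.range lanes).map (pvEffDelay per_lane_delays max_delay)
    let schedule :=
      (List.range steps.toNat).map (fun (t : Nat) =>
        (List.range lanes).map (fun r => pvCellB orig_frames max_delay n delays (t : Int) r))
      ++ [List.replicate lanes 0]
    (schedule, (List.range n).map (fun (k : Nat) => 2 * (k : Int) + max_delay))

-- ===== PRECONDITION & SPEC =====
-- Pre_ excludes exactly the inputs on which Python A raises IndexError: some frame row k is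
-- shorter than a lane index r whose injection time 2k+max_delay-delay[r] falls inside [0, steps)
-- (the only reads A performs into the frames). The proof of equality does not need Pre_ (both
-- ports total with identical defaults); Pre_ is the faithfulness condition for port A.
def Pre_build_parity_aligned_schedule (orig_frames : List (List Int)) (per_lane_delays : List (Option Int)) : Prop :=
  ∀ k < orig_frames.length, ∀ r < (orig_frames.headD []).length,
    (0 ≤ 2 * (k : Int) + pvMaxDelay per_lane_delays - pvEffDelay per_lane_delays (pvMaxDelay per_lane_delays) r ∧
     2 * (k : Int) + pvMaxDelay per_lane_delays - pvEffDelay per_lane_delays (pvMaxDelay per_lane_delays) r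
       < 2 * (orig_frames.length : Int) + pvMaxDelay per_lane_delays) →
    r < (orig_frames.getD k []).length

instance (orig_frames : List (List Int)) (per_lane_delays : List (Option Int)) : Decidable (Pre_build_parity_aligned_schedule orig_frames per_lane_delays) := by unfold Pre_build_parity_aligned_schedule; infer_instance

def pvWitness_build_parity_aligned_schedule : List (List Int) × List (Option Int) :=
  ([[1, 2], [3, 4]], [some 1, none])

def Spec_build_parity_aligned_schedule (orig_frames : List (List Int)) (per_lane_delays : List (Option Int)) (out : List (List Int) × List Int) : Prop := out = build_parity_aligned_schedule_alt orig_frames per_lane_delays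
instance (orig_frames : List (List Int)) (per_lane_delays : List (Option Int)) (out : List (List Int) × List Int) : Decidable (Spec_build_parity_aligned_schedule orig_frames per_lane_delays out) := by unfold Spec_build_parity_aligned_schedule; infer_instance

-- ===== CLAIM (what is proved, stated in full; the proofs are below) =====
def Claim_equal_build_parity_aligned_schedule : Prop := ∀ (orig_frames : List (List Int)) (per_lane_delays : List (Option Int)), Dom_build_parity_aligned_schedule orig_frames per_lane_delays → Pre_build_parity_aligned_schedule orig_frames per_lane_delays → Spec_build_parity_aligned_schedule orig_frames per_lane_delays (build_parity_aligned_schedule orig_frames per_lane_delays)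

-- ===== LEMMAS AND PROOFS =====

lemma pvMaxDelay_nonneg (per : List (Option Int)) : 0 ≤ pvMaxDelay per := by
  unfold pvMaxDelay
  cases h : PySem.List.max? (pvNonneg per) id with
  | none => simp
  | some m =>
    have hm := PySem.List.max?_mem h
    unfold pvNonneg at hm
    simp only [List.mem_filterMap] at hm
    obtain ⟨o, _, ho⟩ := hm
    cases o with
    | none => simp at ho
    | some d =>
      by_cases hd : 0 ≤ d
      · simp [hd] at ho; simpa [ho.symm] using hd
      · simp [hd] at ho

lemma pvCellB_zero (orig : List (List Int)) (M : Int) (delays : List Int) (t : Int) (c : Nat) :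
    pvCellB orig M 0 delays t c = 0 := by
  unfold pvCellB
  have h1 := PySem.Int.floordiv_mul_add_mod (t - M + delays.getD c 0) 2
  have h2 := PySem.Int.mod_nonneg (t - M + delays.getD c 0) (b := 2) (by norm_num)
  split_ifs with h
  · exfalso; omega
  · rfl

lemma pvCellB_succ (orig : List (List Int)) (M : Int) (j : Nat) (delays : List Int) (t : Nat) (c : Nat) :
    pvCellB orig M (j + 1) delays (t : Int) c =
      if (t : Int) = 2 * (j : Int) + M - delays.getD c 0 then (orig.getD j []).getD c 0
      else pvCellB orig M j delays (t : Int) c := by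
  unfold pvCellB
  have h1 := PySem.Int.floordiv_mul_add_mod ((t : Int) - M + delays.getD c 0) 2
  have h2 := PySem.Int.mod_nonneg ((t : Int) - M + delays.getD c 0) (b := 2) (by norm_num)
  have h3 := PySem.Int.mod_lt ((t : Int) - M + delays.getD c 0) (b := 2) (by norm_num)
  by_cases ht : (t : Int) = 2 * (j : Int) + M - delays.getD c 0
  · rw [if_pos ht]
    have hv : (t : Int) - M + delays.getD c 0 = 2 * (j : Int) := by omega
    rw [hv]
    have hm : PySem.Int.mod (2 * (j : Int)) 2 = 0 :=
      (PySem.Int.mod_eq_zero_iff_dvd _ _).2 ⟨(j : Int), by ring⟩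
    have hf : PySem.Int.floordiv (2 * (j : Int)) 2 = (j : Int) := by
      have := PySem.Int.floordiv_mul_add_mod (2 * (j : Int)) 2; omega
    rw [if_pos ⟨by omega, hm, by rw [hf]; exact_mod_cast Nat.lt_succ_self j⟩, hf]
    simp
  · rw [if_neg ht]
    refine if_congr ⟨fun h => ⟨h.1, h.2.1, ?_⟩, fun h => ⟨h.1, h.2.1, by push_cast; omega⟩⟩ rfl rfl
    have hb := h.2.1
    have hc := h.2.2
    push_cast at hc ⊢
    omega

-- getD after a set, phrased for our induction
lemma pv_getD_set {α : Type} (l : List α) (i : Nat) (x : α) (t : Nat) (d : α) :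
    (l.set i x).getD t d = if t = i ∧ i < l.length then x else l.getD t d := by
  simp [List.getD_eq_getElem?_getD, List.getElem?_set]
  split_ifs <;> simp_all

-- the inner loop over the first m lanes, pointwise
lemma pv_inner_spec (orig : List (List Int)) (per : List (Option Int)) (M steps : Int)
    (k : Nat) (m : Nat) (sch : List (List Int)) :
    let res := (List.range m).foldl (pvInnerA orig per M steps k) sch
    res.length = sch.length ∧
    (∀ t, (res.getD t []).length = (sch.getD t []).length) ∧
    (∀ t, t < sch.length → ∀ c,
      (res.getD t []).getD c 0 =
        if c < m ∧ (t : Int) = 2 * (k : Int) + M - pvEffDelay per M c ∧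
            (2 * (k : Int) + M - pvEffDelay per M c) < steps ∧ c < (sch.getD t []).length then
          (orig.getD k []).getD c 0
        else (sch.getD t []).getD c 0) := by
  induction m with
  | zero => simp
  | succ m ih =>
    obtain ⟨ih1, ih2, ih3⟩ := ih
    simp only [List.range_succ, List.foldl_append, List.foldl_cons, List.foldl_nil]
    set res := List.foldl (pvInnerA orig per M steps k) sch (List.range m) with hres
    refine ⟨?_, ?_, ?_⟩
    · unfold pvInnerA
      split_ifs <;> simp [ih1]
    · intro t
      unfold pvInnerA
      split_ifs with hg
      · rw [pv_getD_set]
        split_ifs with hx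
        · rw [List.length_set, hx.1, ih2]
        · exact ih2 t
      · exact ih2 t
    · intro t ht c
      unfold pvInnerA
      by_cases hg : 0 ≤ 2 * (k : Int) + M - pvEffDelay per M m ∧
          2 * (k : Int) + M - pvEffDelay per M m < steps
      · rw [if_pos hg, pv_getD_set]
        by_cases hx : t = (2 * (k : Int) + M - pvEffDelay per M m).toNat ∧
            (2 * (k : Int) + M - pvEffDelay per M m).toNat < res.length
        · rw [if_pos hx]
          have htm : (t : Int) = 2 * (k : Int) + M - pvEffDelay per M m := by omega
          rw [← hx.1, pv_getD_set]
          have hrl := ih2 t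
          by_cases hc : c = m ∧ m < (res.getD t []).length
          · rw [if_pos hc,
              if_pos ⟨by omega, by rw [hc.1]; exact htm, by rw [hc.1]; exact hg.2, by omega⟩,
              hc.1]
          · rw [if_neg hc, ih3 t ht c]
            by_cases hcm : c < m
            · exact if_congr ⟨fun h => ⟨by omega, h.2⟩, fun h => ⟨hcm, h.2⟩⟩ rfl rfl
            · by_cases hce : c = m
              · rw [if_neg (by omega), if_neg ?_]
                intro h
                exact hc ⟨hce, by omega⟩
              · rw [if_neg (by omega), if_neg (by omega)]
        · rw [if_neg hx, ih3 t ht c]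
          by_cases hcm : c < m
          · exact if_congr ⟨fun h => ⟨by omega, h.2⟩, fun h => ⟨hcm, h.2⟩⟩ rfl rfl
          · by_cases hce : c = m
            · rw [if_neg (by omega), if_neg ?_]
              intro h
              subst hce
              have := h.2.1
              exact hx ⟨by omega, by omega⟩
            · rw [if_neg (by omega), if_neg (by omega)]
      · rw [if_neg hg, ih3 t ht c]
        by_cases hcm : c < m
        · exact if_congr ⟨fun h => ⟨by omega, h.2⟩, fun h => ⟨hcm, h.2⟩⟩ rfl rfl
        · by_cases hce : c = m
          · rw [if_neg (by omega), if_neg ?_]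
            intro h
            subst hce
            exact hg ⟨by omega, h.2.2.1⟩
          · rw [if_neg (by omega), if_neg (by omega)]

-- abbreviations for the proof: A's outer fold after j frames, and B's delay table
def pvFoldA (orig : List (List Int)) (per : List (Option Int)) (j : Nat) :
    List (List Int) × List Int :=
  (List.range j).foldl
    (pvOuterA orig per (pvMaxDelay per) (2 * (orig.length : Int) + pvMaxDelay per))
    (List.replicate (2 * (orig.length : Int) + pvMaxDelay per).toNat
      (List.replicate (orig.headD []).length 0), [])

def pvDelays (orig : List (List Int)) (per : List (Option Int)) : List Int :=
  (List.range (orig.headD []).length).map (pvEffDelay per (pvMaxDelay per))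

-- the outer loop over the first j frames
lemma pv_outer_spec (orig : List (List Int)) (per : List (Option Int)) (j : Nat) :
    (pvFoldA orig per j).2 = (List.range j).map (fun (k : Nat) => 2 * (k : Int) + pvMaxDelay per) ∧
    (pvFoldA orig per j).1.length = (2 * (orig.length : Int) + pvMaxDelay per).toNat ∧
    (∀ t, t < (2 * (orig.length : Int) + pvMaxDelay per).toNat →
      ((pvFoldA orig per j).1.getD t []).length = (orig.headD []).length) ∧
    (∀ t, t < (2 * (orig.length : Int) + pvMaxDelay per).toNat →
      ∀ c, c < (orig.headD []).length →
      ((pvFoldA orig per j).1.getD t []).getD c 0 =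
        pvCellB orig (pvMaxDelay per) j (pvDelays orig per) (t : Int) c) := by
  have hM := pvMaxDelay_nonneg per
  induction j with
  | zero =>
    refine ⟨rfl, by simp [pvFoldA], ?_, ?_⟩
    · intro t ht
      simp [pvFoldA, List.getD_eq_getElem?_getD, ht]
    · intro t ht c hc
      rw [pvCellB_zero]
      simp only [pvFoldA, List.range_zero, List.foldl_nil, List.getD_eq_getElem?_getD,
        List.getElem?_replicate, if_pos ht]
      simp
  | succ j ih =>
    obtain ⟨ih2, ih1, ihrow, ihcell⟩ := ih
    have hfold : pvFoldA orig per (j + 1) =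
        pvOuterA orig per (pvMaxDelay per) (2 * (orig.length : Int) + pvMaxDelay per)
          (pvFoldA orig per j) j := by
      simp [pvFoldA, List.range_succ]
    have hinner := pv_inner_spec orig per (pvMaxDelay per)
      (2 * (orig.length : Int) + pvMaxDelay per) j (orig.headD []).length
      (pvFoldA orig per j).1
    obtain ⟨hi1, hi2, hi3⟩ := hinner
    rw [hfold]
    unfold pvOuterA
    refine ⟨?_, ?_, ?_, ?_⟩
    · simp [ih2, List.range_succ]
    · rw [hi1, ih1]
    · intro t ht
      rw [hi2 t]
      exact ihrow t ht
    · intro t ht c hc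
      have htlen : t < (pvFoldA orig per j).1.length := by omega
      rw [hi3 t htlen c, pvCellB_succ]
      have hd : (pvDelays orig per).getD c 0 = pvEffDelay per (pvMaxDelay per) c :=
        PySem.List.getD_map_range _ _ _ _ hc
      rw [hd]
      have hrl := ihrow t ht
      by_cases hcond : (t : Int) = 2 * (j : Int) + pvMaxDelay per - pvEffDelay per (pvMaxDelay per) c
      · rw [if_pos ⟨hc, hcond, by omega, by omega⟩, if_pos hcond]
      · rw [if_neg (by intro h; exact hcond h.2.1), if_neg hcond]
        exact ihcell t ht c hc

-- ===== VERDICT (by name: the statement is the Claim_ definition above) =====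
theorem build_parity_aligned_schedule_spec : Claim_equal_build_parity_aligned_schedule := by
  intro orig per _ _
  unfold Spec_build_parity_aligned_schedule
  by_cases hnil : orig = []
  · simp [build_parity_aligned_schedule, build_parity_aligned_schedule_alt, hnil]
  · have hA : build_parity_aligned_schedule orig per =
        ((pvFoldA orig per orig.length).1 ++ [List.replicate (orig.headD []).length 0],
         (pvFoldA orig per orig.length).2) := by
      simp only [build_parity_aligned_schedule, if_neg hnil]
      rfl
    have hB : build_parity_aligned_schedule_alt orig per =
        ((List.range (2 * (orig.length : Int) + pvMaxDelay per).toNat).map (fun (t : Nat) =>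
            (List.range (orig.headD []).length).map (fun r =>
              pvCellB orig (pvMaxDelay per) orig.length (pvDelays orig per) (t : Int) r))
          ++ [List.replicate (orig.headD []).length 0],
         (List.range orig.length).map (fun (k : Nat) => 2 * (k : Int) + pvMaxDelay per)) := by
      simp only [build_parity_aligned_schedule_alt, if_neg hnil]
      rfl
    rw [hA, hB]
    obtain ⟨h2, h1, hrow, hcell⟩ := pv_outer_spec orig per orig.length
    refine Prod.ext ?_ h2
    simp only []
    congr 1
    apply List.ext_getElem
    · simp [h1]
    · intro t ht1 ht2
      have htS : t < (2 * (orig.length : Int) + pvMaxDelay per).toNat := h1 ▸ ht1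
      rw [List.getElem_map, List.getElem_range]
      have e1 : (pvFoldA orig per orig.length).1[t] =
          (pvFoldA orig per orig.length).1.getD t [] :=
        (List.getD_eq_getElem _ _ ht1).symm
      rw [e1]
      apply List.ext_getElem
      · rw [List.length_map, List.length_range]
        exact hrow t htS
      · intro c hc1 hc2
        have hcl : c < (orig.headD []).length := by simpa using hc2
        have e2 : ((pvFoldA orig per orig.length).1.getD t [])[c] =
            ((pvFoldA orig per orig.length).1.getD t []).getD c 0 :=
          (List.getD_eq_getElem _ _ hc1).symm
        rw [e2, hcell t htS c hcl, List.getElem_map, List.getElem_range]
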